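-- pv_equiv track=rewrite | github.com/EnrikosIossifidis/Heurie | code/algorithms/evolutionnocon.py | fertilize
-- ===== SOURCE A (Python) =====
-- def fertilize(chromosomeX, chromosomeXcopy, chromosomeY, chromosomeYcopy):
--     z = sorted(chromosomeX, key=lambda tup: tup[0])
--
--     # copy first half of genes to child
--     chromosomeChildX = []*150
--     chromosomeChildY = []*150
--
--     fromOtherParentX = list(range(1,len(chromosomeX)+1))
--     fromOtherParentY = list(range(1,len(chromosomeX)+1))
--
--     for gene in range(0, int(len(chromosomeX)/2)):
--         # child parent X
--         # pick first item from shuffled list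
--         randomGeneX = chromosomeX[0]
--         chromosomeX.pop(0)
--
--         # remove gene from the "still has to be added" list
--         fromOtherParentX[randomGeneX[0]-1] = 0
--         # add chosen gene to child
--         chromosomeChildX.append(randomGeneX)
--
--         # child parent Y
--         randomGeneY = chromosomeY[0]
--         chromosomeY.pop(0)
--
--         # remove gene from the "still has to be added" list
--         fromOtherParentY[randomGeneY[0]-1] = 0
--         chromosomeChildY.append(randomGeneY)
--
--
--     # copy second half to child
--     # add the house nrs that are not included yet
--     # child parent X
--     for housenr in fromOtherParentX:
--         for geneY in chromosomeYcopy: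
--             if (geneY[0] == housenr):
--                 chromosomeChildX.append(geneY)
--
--
--     # chromosomeChildY = chromosomeChildX
--     # child parent Y
--     for housenr in fromOtherParentY:
--         for geneX in chromosomeXcopy:
--             if (geneX[0] == housenr):
--                 chromosomeChildY.append(geneX)
--     # chromosomeChildX.sort(key=lambda tup: tup[0])
--
--       # adaptive mutation
--
--
--     return chromosomeChildX, chromosomeChildY
-- ===== SOURCE B (Python) =====
-- def fertilize(chromosomeX, chromosomeXcopy, chromosomeY, chromosomeYcopy):
--     # NOTE: unlike the original, this does not mutate chromosomeX/chromosomeY;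
--     # equivalence is about the return value only.
--     n = len(chromosomeX)
--     h = n // 2
--     childX = list(chromosomeX[:h])
--     childY = list(chromosomeY[:h])
--
--     remX = list(range(1, n + 1))
--     remY = list(range(1, n + 1))
--     for gene in childX:
--         remX[gene[0] - 1] = 0
--     for gene in childY:
--         remY[gene[0] - 1] = 0
--
--     # index each copy-parent once by gene key: one pass instead of a scan per housenr
--     idxY = {}
--     for gene in chromosomeYcopy:
--         idxY[gene[0]] = idxY.get(gene[0], []) + [gene]
--     idxX = {}
--     for gene in chromosomeXcopy:
--         idxX[gene[0]] = idxX.get(gene[0], []) + [gene]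
--
--     for housenr in remX:
--         childX.extend(idxY.get(housenr, []))
--     for housenr in remY:
--         childY.extend(idxX.get(housenr, []))
--     return childX, childY
-- ===== Notes on version B (the rewrite author's own statement) =====
-- stated objective: faster
-- what changed: Replaces A's pop-loop plus a full scan of the copy parent for every housenr by slicing the halves and indexing each copy parent once in a dict keyed by gene[0], then a single lookup pass; B also does not mutate its arguments (equivalence is about the return value).
import Mathlib
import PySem

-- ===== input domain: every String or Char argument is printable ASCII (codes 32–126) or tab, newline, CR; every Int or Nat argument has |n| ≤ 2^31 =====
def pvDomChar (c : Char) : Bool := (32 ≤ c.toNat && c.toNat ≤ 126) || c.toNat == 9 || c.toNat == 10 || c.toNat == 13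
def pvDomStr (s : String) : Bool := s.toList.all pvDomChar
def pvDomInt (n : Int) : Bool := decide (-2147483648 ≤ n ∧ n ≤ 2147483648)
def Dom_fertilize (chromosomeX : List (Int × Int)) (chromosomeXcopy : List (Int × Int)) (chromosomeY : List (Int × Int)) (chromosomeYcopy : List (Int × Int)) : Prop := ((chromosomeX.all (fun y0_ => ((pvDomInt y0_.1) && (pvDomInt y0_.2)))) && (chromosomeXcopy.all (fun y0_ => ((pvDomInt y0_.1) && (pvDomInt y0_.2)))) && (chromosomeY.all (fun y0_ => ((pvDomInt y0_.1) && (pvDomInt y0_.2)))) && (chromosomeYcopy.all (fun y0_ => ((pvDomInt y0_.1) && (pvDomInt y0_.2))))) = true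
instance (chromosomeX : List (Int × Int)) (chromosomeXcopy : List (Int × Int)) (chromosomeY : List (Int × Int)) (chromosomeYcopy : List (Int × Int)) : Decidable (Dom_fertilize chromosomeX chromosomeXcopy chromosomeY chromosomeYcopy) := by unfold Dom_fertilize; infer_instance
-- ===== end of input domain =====

-- B replaces A's per-housenr scan of the copy parent by a dict index built in one pass
-- (O(n) instead of O(n^2)). A also pops the first half off chromosomeX/chromosomeY in
-- place; B does not mutate its arguments — the equivalence is about the return value only.

-- ===== PORT A =====
-- A's first-half loop: 'for gene in range(0, int(len/2))' pops the heads of the two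
-- chromosomes, zeroes the taken housenr slot and appends the gene to the child.
def fertAHalf (k : Nat) (cx cy : List (Int × Int)) (fx fy : List Int)
    (chx chy : List (Int × Int)) :
    List (Int × Int) × List (Int × Int) × List Int × List Int × List (Int × Int) × List (Int × Int) :=
  match k with
  | 0 => (cx, cy, fx, fy, chx, chy)
  | k + 1 =>
    match cx, cy with
    | gx :: cx', gy :: cy' =>
        fertAHalf k cx' cy'
          (PySem.List.pySetD fx (gx.1 - 1) 0)
          (PySem.List.pySetD fy (gy.1 - 1) 0)
          (chx ++ [gx]) (chy ++ [gy])
    | _, _ => (cx, cy, fx, fy, chx, chy)   -- chromosome exhausted: Python raises IndexError here (outside Pre_)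

def fertilize (chromosomeX : List (Int × Int)) (chromosomeXcopy : List (Int × Int)) (chromosomeY : List (Int × Int)) (chromosomeYcopy : List (Int × Int)) : (List (Int × Int)) × (List (Int × Int)) :=
  let _z := PySem.List.sorted chromosomeX (fun tup => tup.1)   -- z = sorted(…): computed, never used
  let n := chromosomeX.length
  let fromOtherParentX := PySem.List.pyRange 1 ((n : Int) + 1) 1
  let fromOtherParentY := PySem.List.pyRange 1 ((n : Int) + 1) 1
  -- int(len(chromosomeX)/2) = n / 2 (Nat division; n ≥ 0)
  let st := fertAHalf (n / 2) chromosomeX chromosomeY fromOtherParentX fromOtherParentY [] []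
  let chromosomeChildX := st.2.2.1.foldl
    (fun acc housenr => chromosomeYcopy.foldl
      (fun a geneY => if geneY.1 == housenr then a ++ [geneY] else a) acc) st.2.2.2.2.1
  let chromosomeChildY := st.2.2.2.1.foldl
    (fun acc housenr => chromosomeXcopy.foldl
      (fun a geneX => if geneX.1 == housenr then a ++ [geneX] else a) acc) st.2.2.2.2.2
  (chromosomeChildX, chromosomeChildY)

-- ===== PORT B =====
-- idx[g[0]] = idx.get(g[0], []) + [gene]  (group the copy parent's genes by key, one pass)
def fertGroup (l : List (Int × Int)) : PySem.Dict Int (List (Int × Int)) :=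
  l.foldl (fun d g => d.modify g.1 [] (· ++ [g])) PySem.Dict.empty

def fertilize_alt (chromosomeX : List (Int × Int)) (chromosomeXcopy : List (Int × Int)) (chromosomeY : List (Int × Int)) (chromosomeYcopy : List (Int × Int)) : (List (Int × Int)) × (List (Int × Int)) :=
  let n := chromosomeX.length
  let h := n / 2
  let childX := chromosomeX.take h   -- chromosomeX[:h], 0 ≤ h
  let childY := chromosomeY.take h
  let remX := childX.foldl (fun r g => PySem.List.pySetD r (g.1 - 1) 0)
    (PySem.List.pyRange 1 ((n : Int) + 1) 1)
  let remY := childY.foldl (fun r g => PySem.List.pySetD r (g.1 - 1) 0)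
    (PySem.List.pyRange 1 ((n : Int) + 1) 1)
  let idxY := fertGroup chromosomeYcopy
  let idxX := fertGroup chromosomeXcopy
  let cX := remX.foldl (fun acc housenr => acc ++ idxY.getD housenr []) childX
  let cY := remY.foldl (fun acc housenr => acc ++ idxX.getD housenr []) childY
  (cX, cY)

-- ===== PRECONDITION & SPEC =====
-- Pre_ excludes exactly the inputs on which the Python A raises: an IndexError from
-- popping chromosomeY when it is shorter than len(chromosomeX)//2, or from the
-- assignment fromOtherParent[gene[0]-1] = 0 when gene[0]-1 is outside Python's
-- (negative-index-wrapping) range for a list of length len(chromosomeX).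
def Pre_fertilize (chromosomeX : List (Int × Int)) (chromosomeXcopy : List (Int × Int)) (chromosomeY : List (Int × Int)) (chromosomeYcopy : List (Int × Int)) : Prop :=
  chromosomeX.length / 2 ≤ chromosomeY.length ∧
  (∀ g ∈ chromosomeX.take (chromosomeX.length / 2), PySem.Raise.InRange chromosomeX.length (g.1 - 1)) ∧
  (∀ g ∈ chromosomeY.take (chromosomeX.length / 2), PySem.Raise.InRange chromosomeX.length (g.1 - 1))
instance (chromosomeX : List (Int × Int)) (chromosomeXcopy : List (Int × Int)) (chromosomeY : List (Int × Int)) (chromosomeYcopy : List (Int × Int)) : Decidable (Pre_fertilize chromosomeX chromosomeXcopy chromosomeY chromosomeYcopy) := by unfold Pre_fertilize; infer_instance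

def pvWitness_fertilize : (List (Int × Int)) × (List (Int × Int)) × (List (Int × Int)) × (List (Int × Int)) :=
  ([(1, 5), (2, 6)], [(1, 7)], [(2, 8), (1, 9)], [(2, 3)])

def Spec_fertilize (chromosomeX : List (Int × Int)) (chromosomeXcopy : List (Int × Int)) (chromosomeY : List (Int × Int)) (chromosomeYcopy : List (Int × Int)) (out : (List (Int × Int)) × (List (Int × Int))) : Prop := out = fertilize_alt chromosomeX chromosomeXcopy chromosomeY chromosomeYcopy
instance (chromosomeX : List (Int × Int)) (chromosomeXcopy : List (Int × Int)) (chromosomeY : List (Int × Int)) (chromosomeYcopy : List (Int × Int)) (out : (List (Int × Int)) × (List (Int × Int))) : Decidable (Spec_fertilize chromosomeX chromosomeXcopy chromosomeY chromosomeYcopy out) := by unfold Spec_fertilize; infer_instance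

-- ===== CLAIM (what is proved, stated in full; the proofs are below) =====
def Claim_equal_fertilize : Prop := ∀ (chromosomeX : List (Int × Int)) (chromosomeXcopy : List (Int × Int)) (chromosomeY : List (Int × Int)) (chromosomeYcopy : List (Int × Int)), Dom_fertilize chromosomeX chromosomeXcopy chromosomeY chromosomeYcopy → Pre_fertilize chromosomeX chromosomeXcopy chromosomeY chromosomeYcopy → Spec_fertilize chromosomeX chromosomeXcopy chromosomeY chromosomeYcopy (fertilize chromosomeX chromosomeXcopy chromosomeY chromosomeYcopy)

-- ===== LEMMAS AND PROOFS =====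

-- Closed form of A's first-half loop when both chromosomes are long enough.
theorem fertAHalf_spec (k : Nat) : ∀ (cx cy : List (Int × Int)) (fx fy : List Int)
    (chx chy : List (Int × Int)), k ≤ cx.length → k ≤ cy.length →
    fertAHalf k cx cy fx fy chx chy =
      (cx.drop k, cy.drop k,
       (cx.take k).foldl (fun r g => PySem.List.pySetD r (g.1 - 1) 0) fx,
       (cy.take k).foldl (fun r g => PySem.List.pySetD r (g.1 - 1) 0) fy,
       chx ++ cx.take k, chy ++ cy.take k) := by
  induction k with
  | zero => intro cx cy fx fy chx chy _ _; simp [fertAHalf]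
  | succ k ih =>
    intro cx cy fx fy chx chy hx hy
    match cx, cy with
    | [], _ => simp at hx
    | _ :: _, [] => simp at hy
    | gx :: cx', gy :: cy' =>
      simp only [fertAHalf]
      rw [ih cx' cy' _ _ _ _ (by simpa using hx) (by simpa using hy)]
      simp [List.append_assoc]

-- The dict index looked up at key c is exactly the scan's filter.
theorem getD_fertGroup (l : List (Int × Int)) (c : Int) :
    (fertGroup l).getD c [] = l.filter (fun g => g.1 == c) := by
  have h : fertGroup l
      = (l.map (fun g => (g.1, g))).foldl
          (fun d p => d.modify p.1 [] (· ++ [p.2])) PySem.Dict.empty := by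
    rw [List.foldl_map]; rfl
  rw [h, PySem.Dict.getD_foldl_modify_append, PySem.Dict.getD_empty]
  simp [List.filter_map, List.map_map, Function.comp_def]

-- ===== VERDICT (by name: the statement is the Claim_ definition above) =====
theorem fertilize_spec : Claim_equal_fertilize := by
  intro X Xc Y Yc _ hpre
  obtain ⟨hY, _, _⟩ := hpre
  show fertilize X Xc Y Yc = fertilize_alt X Xc Y Yc
  simp only [fertilize, fertilize_alt, fertGroup]
  rw [fertAHalf_spec (X.length / 2) X Y _ _ [] [] (Nat.div_le_self _ _) hY]
  simp only [List.nil_append]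
  have hfun : ∀ (Zc : List (Int × Int)),
      (fun (acc : List (Int × Int)) (housenr : Int) => Zc.foldl
        (fun a g => if g.1 == housenr then a ++ [g] else a) acc)
      = fun acc housenr => acc ++ (fertGroup Zc).getD housenr [] := by
    intro Zc; funext acc housenr
    rw [PySem.List.foldl_append_if_eq_filter, getD_fertGroup]
  rw [hfun Yc, hfun Xc]
  simp only [fertGroup]
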